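-- pv_equiv track=rewrite | github.com/countfuzzball/GRSOAF-RSB-FuzzballTools | png_to_rsb_v89_rsbeditor_anim_fixed.py | mip_dimensions
-- ===== SOURCE A (Python) =====
-- def mip_dimensions(width: int, height: int, count: int) -> list[tuple[int, int]]:
--     dims: list[tuple[int, int]] = []
--     w, h = width, height
--     for _ in range(count):
--         w = max(1, w // 2)
--         h = max(1, h // 2)
--         dims.append((w, h))
--     return dims
-- ===== SOURCE B (Python) =====
-- def mip_dimensions(width: int, height: int, count: int) -> list[tuple[int, int]]:
--     return [(max(1, width >> i), max(1, height >> i)) for i in range(1, count + 1)]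
-- ===== Notes on version B (the rewrite author's own statement) =====
-- stated objective: simpler
-- what changed: Replaces the stateful loop that threads halved w/h accumulators with a closed-form comprehension computing each level directly as max(1, value >> i), using that repeated clamped floor-halving equals a single shift once clamped.
import Mathlib
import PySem

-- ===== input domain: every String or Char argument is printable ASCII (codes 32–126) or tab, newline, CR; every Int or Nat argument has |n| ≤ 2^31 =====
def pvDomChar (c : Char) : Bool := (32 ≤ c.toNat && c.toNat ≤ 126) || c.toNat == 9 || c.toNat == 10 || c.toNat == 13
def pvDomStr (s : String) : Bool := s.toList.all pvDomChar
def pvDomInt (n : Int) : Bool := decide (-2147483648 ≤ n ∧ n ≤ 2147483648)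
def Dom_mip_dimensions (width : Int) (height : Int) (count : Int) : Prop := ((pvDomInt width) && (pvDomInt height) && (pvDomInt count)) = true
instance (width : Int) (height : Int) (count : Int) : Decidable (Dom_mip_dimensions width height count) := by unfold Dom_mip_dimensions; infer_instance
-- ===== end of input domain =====

-- B replaces A's stateful halving loop by a closed-form comprehension (level i = max(1, value >> i)); objective: simpler.
-- ===== PORT A =====
-- Port of A: loop over range(count) threading (dims, w, h) state.
def mip_dimensions (width : Int) (height : Int) (count : Int) : List (Int × Int) :=
  ((PySem.List.pyRange 0 count 1).foldl
    (fun (st : List (Int × Int) × Int × Int) _ =>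
      let w := max 1 (PySem.Int.floordiv st.2.1 2)
      let h := max 1 (PySem.Int.floordiv st.2.2 2)
      (st.1 ++ [(w, h)], w, h))
    ([], width, height)).1

-- ===== PORT B =====
-- Port of B: closed-form comprehension over range(1, count+1); Python's '>>' on Int is Lean's '>>>'.
def mip_dimensions_alt (width : Int) (height : Int) (count : Int) : List (Int × Int) :=
  (PySem.List.pyRange 1 (count + 1) 1).map
    (fun i => (max 1 (width >>> i.toNat), max 1 (height >>> i.toNat)))

-- ===== PRECONDITION & SPEC =====
def Spec_mip_dimensions (width : Int) (height : Int) (count : Int) (out : List (Int × Int)) : Prop := out = mip_dimensions_alt width height count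
instance (width : Int) (height : Int) (count : Int) (out : List (Int × Int)) : Decidable (Spec_mip_dimensions width height count out) := by unfold Spec_mip_dimensions; infer_instance

-- ===== CLAIM (what is proved, stated in full; the proofs are below) =====
def Claim_equal_mip_dimensions : Prop := ∀ (width : Int) (height : Int) (count : Int), Dom_mip_dimensions width height count → Spec_mip_dimensions width height count (mip_dimensions width height count)

-- ===== LEMMAS AND PROOFS =====

-- The loop body of A, as a step on the threaded state.
def mipStep (st : List (Int × Int) × Int × Int) (_ : Int) : List (Int × Int) × Int × Int :=
  let w := max 1 (PySem.Int.floordiv st.2.1 2)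
  let h := max 1 (PySem.Int.floordiv st.2.2 2)
  (st.1 ++ [(w, h)], w, h)

theorem shiftRight_nonpos (x : Int) (m : Nat) (h : x ≤ 0) : x >>> m ≤ 0 := by
  rw [Int.shiftRight_eq_div_pow]
  have hc : (0:Int) < 2 ^ m := by positivity
  simpa using Int.ediv_le_ediv hc h

theorem clamp_shift (x : Int) (m : Nat) :
    max 1 ((max 1 x) >>> m) = max 1 (x >>> m) := by
  by_cases hx : 1 ≤ x
  · rw [max_eq_right hx]
  · have h1 : max (1:Int) x = 1 := max_eq_left (by omega)
    have h2 : (1:Int) >>> m ≤ 1 := by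
      rw [Int.shiftRight_eq_div_pow]; exact Int.ediv_le_self _ one_pos.le
    have h3 : x >>> m ≤ 0 := shiftRight_nonpos x m (by omega)
    rw [h1]; omega

theorem shift_one_eq_div (x : Int) : x >>> (1:Nat) = x / 2 := by
  rw [Int.shiftRight_eq_div_pow]; norm_num

theorem clamp_shift_succ (z : Int) (k : Nat) :
    max 1 ((max 1 (z >>> (1:Nat))) >>> (k + 1)) = max 1 (z >>> (k + 1 + 1)) := by
  rw [clamp_shift, ← Int.shiftRight_add]
  congr 2
  omega

theorem fold_gen (l : List Int) : ∀ (acc : List (Int × Int)) (w h : Int),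
    (l.foldl mipStep (acc, w, h)).1
      = acc ++ (List.range l.length).map
          (fun (k : Nat) => ((max 1 (w >>> (k + 1)), max 1 (h >>> (k + 1))) : Int × Int)) := by
  induction l with
  | nil => intro acc w h; simp
  | cons x t ih =>
    intro acc w h
    have step1 : mipStep (acc, w, h) x
        = (acc ++ [(max 1 (w >>> (1:Nat)), max 1 (h >>> (1:Nat)))],
           max 1 (w >>> (1:Nat)), max 1 (h >>> (1:Nat))) := by
      simp only [mipStep, shift_one_eq_div]
      simp [PySem.Int.floordiv, Int.fdiv_eq_ediv]
    rw [List.foldl_cons, step1, ih, List.length_cons, List.range_succ_eq_map]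
    simp only [List.map_cons, List.map_map, List.append_assoc, List.singleton_append]
    congr 1
    congr 1
    apply List.map_congr_left
    intro k _
    simp only [Function.comp_apply]
    rw [clamp_shift_succ, clamp_shift_succ]

-- ===== VERDICT (by name: the statement is the Claim_ definition above) =====
theorem mip_dimensions_spec : Claim_equal_mip_dimensions := by
  intro width height count _
  show mip_dimensions width height count = mip_dimensions_alt width height count
  unfold mip_dimensions mip_dimensions_alt
  rw [show (fun (st : List (Int × Int) × Int × Int) (x : Int) =>
        let w := max 1 (PySem.Int.floordiv st.2.1 2)
        let h := max 1 (PySem.Int.floordiv st.2.2 2)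
        (st.1 ++ [(w, h)], w, h)) = mipStep from rfl]
  rw [fold_gen, PySem.List.pyRange_one 1 (count + 1), PySem.List.pyRange_one 0 count,
      List.length_map, List.length_range]
  simp only [List.nil_append, List.map_map]
  have hlen : (count - 0).toNat = (count + 1 - 1).toNat := by omega
  rw [hlen]
  apply List.map_congr_left
  intro k _
  simp only [Function.comp_apply]
  have h1 : ((1:Int) + (k:Int)).toNat = k + 1 := by omega
  rw [h1]
  have h2 : ((k:Int) + 1) = ((k + 1 : Nat) : Int) := by push_cast; ring
  refine Prod.ext ?_ ?_ <;> simp <;> rw [h2, Int.shiftRight_natCast_right]
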